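-- pv_equiv track=rewrite | github.com/Rivarrl/leetcode_python | extra/solution1.py | bd_alg1
-- ===== SOURCE A (Python) =====
-- def bd_alg1(n):
--     """
--     花园修路（字节跳动2019秋招算法岗笔试题1）
--     现有一个圆形花园共有n个入口，现在要修一些路，穿过这些花园。要求每个入口只能有一条路，所有的路均不会相交。
--     求所有可行的方法总数 (n为2~1000的偶数), 结果超过10^9+7取mod
--     :param n: int
--     :return: int
--     """
--     dp = [0] * (n+1)
--     dp[0] = 1
--     dp[2] = 1
--     for i in range(4, n+1, 2):
--         for j in range(0, i, 2):
--             dp[i] += dp[j] * dp[i-2-j]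
--     return dp[n] % (10**9+7)
-- ===== SOURCE B (Python) =====
-- def bd_alg1(n):
--     if n % 2:
--         return 0
--     m = n // 2
--     c = 1
--     for k in range(1, m + 1):
--         c = c * (m + k) // k   # c == comb(m+k, k), division exact at each step
--     return (c // (m + 1)) % (10**9 + 7)
-- ===== Notes on version B (the rewrite author's own statement) =====
-- stated objective: faster
-- what changed: Replaces A's O(m^2) Catalan convolution dp (m = n/2, on unreduced big integers) with the O(m) incremental product formula for the central binomial coefficient comb(2m,m) followed by the exact division by m+1, taking the modulus at the end exactly as A does.
-- outside the precondition, e.g. on bd_alg1(1): A raises IndexError, B returns 0; on bd_alg1(0): A raises IndexError, B returns 1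
import Mathlib
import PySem

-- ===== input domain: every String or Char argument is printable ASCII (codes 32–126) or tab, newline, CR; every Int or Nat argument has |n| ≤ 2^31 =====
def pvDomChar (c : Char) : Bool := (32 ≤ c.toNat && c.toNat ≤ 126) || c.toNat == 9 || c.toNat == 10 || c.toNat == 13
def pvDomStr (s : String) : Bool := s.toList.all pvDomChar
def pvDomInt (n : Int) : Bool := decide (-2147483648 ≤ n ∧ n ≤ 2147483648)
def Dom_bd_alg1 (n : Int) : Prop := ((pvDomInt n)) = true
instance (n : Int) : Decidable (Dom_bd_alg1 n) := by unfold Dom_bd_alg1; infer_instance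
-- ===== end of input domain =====

-- B replaces A's O(m^2) convolution dp (m = n/2, huge unreduced big-ints) by the O(m)
-- product formula for the central binomial coefficient and exact division by m+1 (Catalan).

-- ===== PORT A =====
def bd_alg1 (n : Int) : Int :=
  -- dp = [0]*(n+1); dp[0] = 1; dp[2] = 1   (IndexError on inputs outside Pre_)
  let dp : List Int := List.replicate (n + 1).toNat 0
  let dp := PySem.List.pySetD dp 0 1
  let dp := PySem.List.pySetD dp 2 1
  -- for i in range(4, n+1, 2): for j in range(0, i, 2): dp[i] += dp[j] * dp[i-2-j]
  let dp := (PySem.List.pyRange 4 (n + 1) 2).foldl (fun dp i =>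
    (PySem.List.pyRange 0 i 2).foldl (fun dp j =>
      PySem.List.pySetD dp i
        (PySem.List.pyGetD dp i 0 + PySem.List.pyGetD dp j 0 * PySem.List.pyGetD dp (i - 2 - j) 0)) dp) dp
  PySem.Int.mod (PySem.List.pyGetD dp n 0) (10 ^ 9 + 7)

-- ===== PORT B =====
def bd_alg1_alt (n : Int) : Int :=
  if PySem.Int.mod n 2 ≠ 0 then 0
  else
    let m := PySem.Int.floordiv n 2
    -- c = 1; for k in range(1, m+1): c = c * (m + k) // k
    let c := (PySem.List.pyRange 1 (m + 1) 1).foldl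
      (fun c k => PySem.Int.floordiv (c * (m + k)) k) 1
    PySem.Int.mod (PySem.Int.floordiv c (m + 1)) (10 ^ 9 + 7)

-- ===== PRECONDITION & SPEC =====
-- Pre_ excludes exactly n ≤ 1, where the Python A raises IndexError (the dp-table seeding writes past the end of a too-short list).
def Pre_bd_alg1 (n : Int) : Prop := 2 ≤ n
instance (n : Int) : Decidable (Pre_bd_alg1 n) := by unfold Pre_bd_alg1; infer_instance
def pvWitness_bd_alg1 : Int := 6

def Spec_bd_alg1 (n : Int) (out : Int) : Prop := out = bd_alg1_alt n
instance (n : Int) (out : Int) : Decidable (Spec_bd_alg1 n out) := by unfold Spec_bd_alg1; infer_instance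

-- ===== CLAIM (what is proved, stated in full; the proofs are below) =====
def Claim_equal_bd_alg1 : Prop := ∀ (n : Int), Dom_bd_alg1 n → Pre_bd_alg1 n → Spec_bd_alg1 n (bd_alg1 n)

-- ===== LEMMAS AND PROOFS =====

-- `pyGetD` / `pySetD` at a nonnegative Int index, in Nat form.
theorem pyGetD_toNat (xs : List Int) (i : Int) (d : Int) (h : 0 ≤ i) :
    PySem.List.pyGetD xs i d = xs.getD i.toNat d := by
  rw [show i = ((i.toNat : Nat) : Int) from (Int.toNat_of_nonneg h).symm,
    PySem.List.pyGetD_natCast]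
  simp [Int.toNat_of_nonneg h, max_eq_left h]

-- The dp table A maintains: entry 2j holds catalan j for j ≤ k, every other entry is 0.
def tab (N k : Nat) : List Int :=
  (List.range N).map (fun idx => if idx % 2 = 0 ∧ idx ≤ 2 * k then ((catalan (idx / 2) : Nat) : Int) else 0)

theorem getD_set_ne' (l : List Int) (n m : Nat) (v : Int) (h : m ≠ n) :
    (l.set n v).getD m 0 = l.getD m 0 := by
  simp [List.getD_getElem?, List.getElem?_set_ne h.symm]

theorem getD_set_self' (l : List Int) (n : Nat) (v : Int) (h : n < l.length) :
    (l.set n v).getD n 0 = v := by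
  simp [List.getD_getElem?, List.getElem?_set_self, h]

theorem tab_length (N k : Nat) : (tab N k).length = N := by simp [tab]

theorem tab_getD (N k idx : Nat) :
    (tab N k).getD idx 0 =
      if idx < N ∧ idx % 2 = 0 ∧ idx ≤ 2 * k then ((catalan (idx / 2) : Nat) : Int) else 0 := by
  by_cases h : idx < N
  · rw [List.getD_eq_getElem _ _ (by simpa [tab_length] using h)]
    simp [tab, h]
  · rw [List.getD_eq_default _ _ (by simpa [tab_length] using Nat.le_of_not_lt h)]
    simp [h]

-- initial table: dp = [0]*(n+1); dp[0]=1; dp[2]=1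
theorem init_eq (N : Nat) (h : 3 ≤ N) :
    PySem.List.pySetD (PySem.List.pySetD (List.replicate N (0 : Int)) 0 1) 2 1 = tab N 1 := by
  rw [PySem.List.pySetD_of_nonneg _ _ (by norm_num), PySem.List.pySetD_of_nonneg _ _ (by norm_num)]
  apply List.ext_getElem (by simp [tab_length])
  intro i h1 h2
  simp only [tab, List.getElem_map, List.getElem_range]
  rcases Nat.lt_or_ge i 3 with hi | hi
  · interval_cases i <;>
      simp [List.getElem_set, List.getElem_replicate]
  · rw [List.getElem_set_ne (by omega), List.getElem_set_ne (by omega), List.getElem_replicate]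
    have : ¬ (i % 2 = 0 ∧ i ≤ 2 * 1) := by omega
    simp [this]

-- the inner loop 'for j in js: dp[i] += dp[j]*dp[i-2-j]' accumulates a sum at index i,
-- reading only indices below i.
theorem inner_fold (i : Int) (js : List Int) :
    ∀ (dp : List Int), 0 ≤ i → i.toNat < dp.length →
    (∀ j ∈ js, 0 ≤ j ∧ j ≤ i - 2) →
    js.foldl (fun dp j =>
        PySem.List.pySetD dp i
          (PySem.List.pyGetD dp i 0 + PySem.List.pyGetD dp j 0 * PySem.List.pyGetD dp (i - 2 - j) 0)) dp
      = dp.set i.toNat (dp.getD i.toNat 0 +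
          (js.map (fun j => dp.getD j.toNat 0 * dp.getD (i - 2 - j).toNat 0)).sum) := by
  induction js with
  | nil =>
    intro dp hi hlen _
    simp only [List.foldl_nil, List.map_nil, List.sum_nil, add_zero]
    rw [List.getD_eq_getElem _ _ hlen]
    exact (List.set_getElem_self hlen).symm
  | cons j js ih =>
    intro dp hi hlen hall
    obtain ⟨hj0, hj2⟩ := hall j (List.mem_cons_self)
    have hij : j.toNat < i.toNat := by omega
    have hij2 : (i - 2 - j).toNat < i.toNat := by omega
    simp only [List.foldl_cons]
    rw [PySem.List.pySetD_of_nonneg _ _ hi, pyGetD_toNat _ _ _ hi, pyGetD_toNat _ _ _ hj0,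
      pyGetD_toNat _ _ _ (by omega : (0:Int) ≤ i - 2 - j)]
    set v := dp.getD i.toNat 0 + dp.getD j.toNat 0 * dp.getD (i - 2 - j).toNat 0 with hv
    rw [ih (dp.set i.toNat v) hi (by simpa using hlen) (fun j' hj' => hall j' (List.mem_cons_of_mem _ hj'))]
    rw [List.set_set]
    congr 1
    have hset_same : (dp.set i.toNat v).getD i.toNat 0 = v := getD_set_self' _ _ _ hlen
    have hmap : (js.map (fun j' => (dp.set i.toNat v).getD j'.toNat 0 * (dp.set i.toNat v).getD (i - 2 - j').toNat 0))
        = js.map (fun j' => dp.getD j'.toNat 0 * dp.getD (i - 2 - j').toNat 0) := by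
      apply List.map_congr_left
      intro j' hj'
      obtain ⟨hj'0, hj'2⟩ := hall j' (List.mem_cons_of_mem _ hj')
      rw [getD_set_ne' _ _ _ _ (by omega), getD_set_ne' _ _ _ _ (by omega)]
    rw [hset_same, hmap, hv]
    simp only [List.map_cons, List.sum_cons]
    ring

-- one outer iteration: i = 2*(k+1) turns tab N k into tab N (k+1)
theorem outer_step (N k : Nat) (h : 2 * k + 2 < N) :
    (PySem.List.pyRange 0 (2 * ((k : Int) + 1)) 2).foldl (fun dp j =>
        PySem.List.pySetD dp (2 * ((k : Int) + 1))
          (PySem.List.pyGetD dp (2 * ((k : Int) + 1)) 0 +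
            PySem.List.pyGetD dp j 0 * PySem.List.pyGetD dp (2 * ((k : Int) + 1) - 2 - j) 0)) (tab N k)
      = tab N (k + 1) := by
  have hrange : PySem.List.pyRange 0 (2 * ((k : Int) + 1)) 2
      = (List.range (k + 1)).map (fun (a : Nat) => 0 + 2 * (a : Int)) := by
    rw [PySem.List.pyRange_of_pos _ _ (by norm_num)]
    rw [if_pos (by omega)]
    congr 2
    omega
  rw [hrange]
  rw [inner_fold (2 * ((k : Int) + 1)) _ (tab N k) (by omega)
    (by rw [tab_length]; omega)
    (by
      intro j hj
      simp only [List.mem_map, List.mem_range] at hj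
      obtain ⟨a, ha, rfl⟩ := hj
      refine ⟨by omega, ?_⟩
      have : (a : Int) ≤ (k : Int) := by exact_mod_cast Nat.lt_succ_iff.mp ha
      omega)]
  have hiN : (2 * ((k : Int) + 1)).toNat = 2 * k + 2 := by omega
  have hzero : (tab N k).getD (2 * ((k : Int) + 1)).toNat 0 = 0 := by
    rw [hiN, tab_getD]
    have : ¬ (2 * k + 2 < N ∧ (2 * k + 2) % 2 = 0 ∧ 2 * k + 2 ≤ 2 * k) := by omega
    simp [this]
  have hsum : (((List.range (k + 1)).map (fun (a : Nat) => 0 + 2 * (a : Int))).map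
        (fun j => (tab N k).getD j.toNat 0 * (tab N k).getD (2 * ((k : Int) + 1) - 2 - j).toNat 0)).sum
      = ((catalan (k + 1) : Nat) : Int) := by
    rw [List.map_map]
    have hcongr : ((List.range (k + 1)).map
          ((fun j => (tab N k).getD j.toNat 0 * (tab N k).getD (2 * ((k : Int) + 1) - 2 - j).toNat 0)
            ∘ (fun (a : Nat) => 0 + 2 * (a : Int))))
        = (List.range (k + 1)).map (fun (a : Nat) => ((catalan a * catalan (k - a) : Nat) : Int)) := by
      apply List.map_congr_left
      intro a ha
      simp only [List.mem_range] at ha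
      have hak : a ≤ k := Nat.lt_succ_iff.mp ha
      simp only [Function.comp]
      have h1 : ((0 : Int) + 2 * (a : Int)).toNat = 2 * a := by omega
      have h2 : (2 * ((k : Int) + 1) - 2 - (0 + 2 * (a : Int))).toNat = 2 * (k - a) := by omega
      rw [h1, h2, tab_getD, tab_getD]
      have c1 : 2 * a < N ∧ (2 * a) % 2 = 0 ∧ 2 * a ≤ 2 * k := by omega
      have c2 : 2 * (k - a) < N ∧ (2 * (k - a)) % 2 = 0 ∧ 2 * (k - a) ≤ 2 * k := by omega
      rw [if_pos c1, if_pos c2]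
      have e1 : 2 * a / 2 = a := by omega
      have e2 : 2 * (k - a) / 2 = k - a := by omega
      rw [e1, e2]
      push_cast
      ring
    rw [hcongr]
    have : ((List.range (k + 1)).map (fun (a : Nat) => ((catalan a * catalan (k - a) : Nat) : Int))).sum
        = ∑ a ∈ Finset.range (k + 1), ((catalan a * catalan (k - a) : Nat) : Int) := rfl
    rw [this, ← Nat.cast_sum]
    congr 1
    rw [catalan_succ k, Fin.sum_univ_eq_sum_range (fun i => catalan i * catalan (k - i)) (k + 1)]
  rw [hzero, hsum, hiN, zero_add]
  apply List.ext_getElem (by simp [tab_length])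
  intro idx hlen1 hlen2
  rw [tab_length] at hlen2
  rw [List.getElem_set]
  by_cases hidx : 2 * k + 2 = idx
  · subst hidx
    rw [if_pos rfl]
    simp only [tab, List.getElem_map, List.getElem_range]
    have : (2 * k + 2) % 2 = 0 ∧ 2 * k + 2 ≤ 2 * (k + 1) := by omega
    rw [if_pos this]
    congr 2
    omega
  · rw [if_neg hidx]
    simp only [tab, List.getElem_map, List.getElem_range]
    have : (idx % 2 = 0 ∧ idx ≤ 2 * k) ↔ (idx % 2 = 0 ∧ idx ≤ 2 * (k + 1)) := by omega
    by_cases hc : idx % 2 = 0 ∧ idx ≤ 2 * k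
    · rw [if_pos hc, if_pos (this.mp hc)]
    · rw [if_neg hc, if_neg (fun h => hc (this.mpr h))]

-- the outer loop 'for i in range(4, n+1, 2)' advances the table from k = 1 to k = M
theorem outer_fold (N M : Nat) (hM : 1 <= M) (h2 : 2 * M < N) :
    ∀ r, r ≤ M - 1 → ((List.range r).map (fun (a : Nat) => 4 + 2 * (a : Int))).foldl
      (fun dp i => (PySem.List.pyRange 0 i 2).foldl (fun dp j =>
        PySem.List.pySetD dp i
          (PySem.List.pyGetD dp i 0 +
            PySem.List.pyGetD dp j 0 * PySem.List.pyGetD dp (i - 2 - j) 0)) dp) (tab N 1)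
      = tab N (1 + r) := by
  intro r
  induction r with
  | zero => simp
  | succ r ih =>
    intro hr
    rw [List.range_succ, List.map_append, List.foldl_append, ih (by omega)]
    simp only [List.map_cons, List.map_nil, List.foldl_cons, List.foldl_nil]
    have hi : (4 : Int) + 2 * (r : Int) = 2 * (((r + 1 : Nat) : Int) + 1) := by push_cast; ring
    have h1r : 1 + r = r + 1 := by omega
    rw [hi, h1r, outer_step N (r + 1) (by omega)]
    congr 1
    omega

-- the B loop computes the binomial coefficient choose (m+r) r after r steps
theorem binom_loop (m : Nat) :
    ∀ r : Nat, ((List.range r).map (fun (a : Nat) => 1 + (a : Int))).foldl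
        (fun c k => PySem.Int.floordiv (c * ((m : Int) + k)) k) 1 = (((m + r).choose r : Nat) : Int) := by
  intro r
  induction r with
  | zero => simp
  | succ r ih =>
    rw [List.range_succ, List.map_append, List.foldl_append, ih]
    simp only [List.map_cons, List.map_nil, List.foldl_cons, List.foldl_nil]
    rw [PySem.Int.floordiv_eq_ediv_of_pos (by omega : (0:Int) < 1 + r)]
    have key : (m + r + 1) * (m + r).choose r = (m + r + 1).choose (r + 1) * (r + 1) :=
      Nat.succ_mul_choose_eq (m + r) r
    have : (((m + r).choose r : Nat) : Int) * ((m : Int) + (1 + (r : Int)))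
        = (((m + r + 1).choose (r + 1) : Nat) : Int) * ((1 : Int) + (r : Int)) := by
      push_cast
      push_cast at key
      linarith [key]
    rw [this, Int.mul_ediv_cancel _ (by omega)]
    congr 2

-- ===== VERDICT (by name: the statement is the Claim_ definition above) =====
theorem bd_alg1_spec : Claim_equal_bd_alg1 := by
  intro n _ hpre
  unfold Pre_bd_alg1 at hpre
  unfold Spec_bd_alg1
  obtain ⟨nn, rfl⟩ : ∃ nn : Nat, n = (nn : Int) := ⟨n.toNat, (Int.toNat_of_nonneg (by omega)).symm⟩
  have hnn : 2 ≤ nn := by exact_mod_cast hpre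
  set M : Nat := nn / 2 with hM
  have hM1 : 1 ≤ M := by omega
  -- A's side
  have hA : bd_alg1 (nn : Int) = PySem.Int.mod ((tab (nn + 1) M).getD nn 0) (10 ^ 9 + 7) := by
    unfold bd_alg1
    simp only []
    have hrep : ((nn : Int) + 1).toNat = nn + 1 := by omega
    have hinit := init_eq (nn + 1) (by omega)
    rw [hrep, hinit]
    have hrange : PySem.List.pyRange 4 ((nn : Int) + 1) 2
        = (List.range (M - 1)).map (fun (a : Nat) => 4 + 2 * (a : Int)) := by
      rw [PySem.List.pyRange_of_pos _ _ (by norm_num)]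
      have hcnt : (if (4:Int) < (nn:Int) + 1 then (((nn:Int) + 1 - 4 + 2 - 1) / 2).toNat else 0) = M - 1 := by
        split_ifs with h4 <;> omega
      rw [hcnt]
    rw [hrange, outer_fold (nn + 1) M hM1 (by omega) (M - 1) le_rfl]
    have : 1 + (M - 1) = M := by omega
    rw [this, pyGetD_toNat _ _ _ (by omega)]
    congr 2
  rw [hA]
  -- B's side
  unfold bd_alg1_alt
  simp only []
  have hmod2 : PySem.Int.mod (nn : Int) 2 = ((nn % 2 : Nat) : Int) := by
    rw [PySem.Int.mod_eq_emod_of_pos (by norm_num)]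
    omega
  by_cases hodd : nn % 2 = 1
  · -- odd n: A reads an odd index (always 0), B returns 0 from the parity branch
    rw [if_pos (by rw [hmod2, hodd]; norm_num)]
    have : (tab (nn + 1) M).getD nn 0 = 0 := by
      rw [tab_getD]
      have h : ¬ (nn < nn + 1 ∧ nn % 2 = 0 ∧ nn ≤ 2 * M) := by omega
      rw [if_neg h]
    rw [this, PySem.Int.mod_eq_emod_of_pos (by norm_num)]
    norm_num
  · -- even n = 2M
    have heven : nn % 2 = 0 := by omega
    rw [if_neg (by rw [hmod2, heven]; norm_num)]
    have hfd : PySem.Int.floordiv (nn : Int) 2 = (M : Int) := by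
      rw [PySem.Int.floordiv_eq_ediv_of_pos (by norm_num : (0:Int) < 2)]
      omega
    rw [hfd]
    have hrangeB : PySem.List.pyRange 1 ((M : Int) + 1) 1
        = (List.range M).map (fun (a : Nat) => 1 + (a : Int)) := by
      rw [PySem.List.pyRange_one]
      have h1 : ((M : Int) + 1 - 1).toNat = M := by omega
      rw [h1]
    rw [hrangeB, binom_loop M M]
    have hcb : (M + M).choose M = (M + 1) * catalan M := by
      rw [succ_mul_catalan_eq_centralBinom]
      unfold Nat.centralBinom
      rw [two_mul]
    have hdiv : PySem.Int.floordiv (((M + M).choose M : Nat) : Int) ((M : Int) + 1) = ((catalan M : Nat) : Int) := by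
      rw [PySem.Int.floordiv_eq_ediv_of_pos (by omega), hcb]
      push_cast
      rw [Int.mul_ediv_cancel_left _ (by omega)]
    rw [hdiv]
    have hgetD : (tab (nn + 1) M).getD nn 0 = ((catalan M : Nat) : Int) := by
      rw [tab_getD, if_pos (by omega)]
    rw [hgetD]
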